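-- pv_equiv track=rewrite | github.com/happyphonon/capital_one_solution | problem_15.py | solution
-- ===== SOURCE A (Python) =====
-- def solution(arr, num):
--     max = num
--     final = num
--     for val in arr:
--         final += val
--         if final > max:
--             max = final
--     return max, final
-- ===== SOURCE B (Python) =====
-- def solution(arr, num):
--     prefixes = [num]
--     for val in arr:
--         prefixes.append(prefixes[-1] + val)
--     return max(prefixes), prefixes[-1]
-- ===== Notes on version B (the rewrite author's own statement) =====
-- stated objective: alternative
-- what changed: Builds the full prefix-sum table first, then takes max(prefixes) and prefixes[-1], instead of A's single fused loop with an inline running-max update.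
import Mathlib
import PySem

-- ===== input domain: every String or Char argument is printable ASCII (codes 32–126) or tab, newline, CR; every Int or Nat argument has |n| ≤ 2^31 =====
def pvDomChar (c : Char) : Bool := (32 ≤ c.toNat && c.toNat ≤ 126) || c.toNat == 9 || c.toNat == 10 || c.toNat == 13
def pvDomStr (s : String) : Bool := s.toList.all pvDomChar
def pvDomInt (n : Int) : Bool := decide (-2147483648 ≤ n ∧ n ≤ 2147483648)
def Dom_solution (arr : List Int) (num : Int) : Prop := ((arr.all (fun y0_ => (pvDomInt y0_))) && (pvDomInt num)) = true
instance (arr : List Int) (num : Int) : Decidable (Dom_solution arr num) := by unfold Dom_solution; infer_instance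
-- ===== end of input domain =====

-- B builds the prefix-sum table first and then takes max(prefixes) and prefixes[-1];
-- A fuses running sum and inline max into one loop. Same O(n) cost, alternative decomposition.

-- ===== PORT A =====
def solution (arr : List Int) (num : Int) : Int × Int :=
  arr.foldl (fun st val =>
    let final := st.2 + val
    (if final > st.1 then final else st.1, final)) (num, num)

-- ===== PORT B =====
-- prefixes[-1] is ported with PySem.List.pyGet? (-1); the list is never empty, so .getD 0 never fires.
def solution_alt (arr : List Int) (num : Int) : Int × Int :=
  let prefixes := arr.foldl (fun ps val => ps ++ [(PySem.List.pyGet? ps (-1)).getD 0 + val]) [num]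
  ((PySem.List.max? prefixes (fun y => y)).getD 0, (PySem.List.pyGet? prefixes (-1)).getD 0)

-- ===== PRECONDITION & SPEC =====
def Spec_solution (arr : List Int) (num : Int) (out : Int × Int) : Prop := out = solution_alt arr num
instance (arr : List Int) (num : Int) (out : Int × Int) : Decidable (Spec_solution arr num out) := by unfold Spec_solution; infer_instance

-- ===== CLAIM (what is proved, stated in full; the proofs are below) =====
def Claim_equal_solution : Prop := ∀ (arr : List Int) (num : Int), Dom_solution arr num → Spec_solution arr num (solution arr num)

-- ===== LEMMAS AND PROOFS =====

-- Invariant: running A's fold from (max of ps, last of ps) equals (max, last) of B's extended prefix table.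
lemma solution_key (arr : List Int) : ∀ (t : List Int) (h : Int),
    arr.foldl (fun st val =>
      let final := st.2 + val
      (if final > st.1 then final else st.1, final)) (t.foldl max h, ((h :: t).getLast?).getD 0)
    = (((PySem.List.max? (arr.foldl (fun ps val => ps ++ [(PySem.List.pyGet? ps (-1)).getD 0 + val]) (h :: t)) (fun y => y)).getD 0),
       ((PySem.List.pyGet? (arr.foldl (fun ps val => ps ++ [(PySem.List.pyGet? ps (-1)).getD 0 + val]) (h :: t)) (-1)).getD 0)) := by
  induction arr with
  | nil =>
    intro t h
    simp [PySem.List.max?_id_cons, PySem.List.pyGet?_neg_one]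
  | cons val rest ih =>
    intro t h
    simp only [List.foldl_cons]
    rw [PySem.List.pyGet?_neg_one]
    set L : Int := ((h :: t).getLast?).getD 0 with hL
    have hcons : (h :: t) ++ [L + val] = h :: (t ++ [L + val]) := by simp
    rw [hcons]
    have hih := ih (t ++ [L + val]) h
    rw [← hih]
    congr 1
    refine Prod.ext ?_ ?_
    · rw [List.foldl_append]
      simp only [List.foldl_cons, List.foldl_nil, gt_iff_lt, max_def]
      split_ifs <;> omega
    · rw [← hcons, List.getLast?_concat]
      simp

-- ===== VERDICT (by name: the statement is the Claim_ definition above) =====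
theorem solution_spec : Claim_equal_solution := by
  intro arr num _
  unfold Spec_solution solution solution_alt
  have := solution_key arr [] num
  simpa using this
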